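-- pv_equiv track=rewrite | github.com/namaksimow/LeetCode | codeforces/C/Хитрый продавец (простая версия).py | find_melon_number
-- ===== SOURCE A (Python) =====
-- def find_melon_number(number_n):
--     if number_n < 3:
--         return number_n * 3
--
--     devider = 1
--     x = 0
--     answer_number = 0
--
--     while number_n >= 3:
--         if devider * 3 > number_n:
--             answer_number += 3 ** (x + 1) + x * 3 ** (x - 1)
--             number_n -= devider
--             x = 0
--             devider = 1
--         else:
--             x += 1
--             devider *= 3
--
--     return answer_number + find_melon_number(number_n)
-- ===== SOURCE B (Python) =====
-- def find_melon_number(number_n):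
--     if number_n < 3:
--         return number_n * 3
--     total = 0
--     m = number_n // 3
--     k = 1
--     while m > 0:
--         total += (m % 3) * (3 ** (k + 1) + k * 3 ** (k - 1))
--         m //= 3
--         k += 1
--     return total + 3 * (number_n % 3)
-- ===== Notes on version B (the rewrite author's own statement) =====
-- stated objective: simpler
-- what changed: A's greedy loop that repeatedly re-ramps a divider from 1 up to the largest power of 3 and subtracts it (plus a recursive tail call) is replaced by a single base-3 digit loop over number_n // 3 that adds each digit's contribution d*(3^(k+1)+k*3^(k-1)) once, finishing with 3*(number_n % 3).
import Mathlib
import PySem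

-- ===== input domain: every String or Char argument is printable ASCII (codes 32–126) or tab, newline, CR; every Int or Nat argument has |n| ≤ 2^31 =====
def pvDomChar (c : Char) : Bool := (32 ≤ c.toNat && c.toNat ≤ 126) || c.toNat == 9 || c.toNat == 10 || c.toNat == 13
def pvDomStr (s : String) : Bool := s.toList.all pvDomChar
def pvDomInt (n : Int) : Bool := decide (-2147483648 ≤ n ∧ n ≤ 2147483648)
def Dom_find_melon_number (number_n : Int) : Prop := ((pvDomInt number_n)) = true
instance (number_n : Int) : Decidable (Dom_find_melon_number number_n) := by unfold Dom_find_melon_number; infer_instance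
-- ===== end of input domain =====

-- B replaces A's greedy repeated subtraction of the largest power of 3 (with a recursive
-- tail call) by a single base-3 digit loop over number_n // 3: same values, one plain loop.

-- ===== PORT A =====
-- A's while loop, state (number_n, devider, x, answer_number).  x is A's counter, kept as
-- a Nat (in Python it is an int that starts at 0, is only incremented and reset to 0, and
-- whenever the first branch fires x ≥ 1, so the Nat-clamped exponent x - 1 is exact);
-- hd is a totality guard only (devider is 1 at the entry call and stays positive).
-- Returns the pair (answer_number, number_n) at loop exit.
def melonLoop (n d : Int) (x : Nat) (ans : Int) (hd : 0 < d) : Int × Int :=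
  if _h : 3 ≤ n then
    if _h2 : d * 3 > n then
      melonLoop (n - d) 1 0 (ans + 3 ^ (x + 1) + (x : Int) * 3 ^ (x - 1)) (by norm_num)
    else
      melonLoop n (d * 3) (x + 1) ans (by positivity)
  else (ans, n)
termination_by (n.toNat, n.toNat + 1 - d.toNat)
decreasing_by
  · left; omega
  · right; omega

def find_melon_number (number_n : Int) : Int :=
  if number_n < 3 then number_n * 3
  else
    -- the while loop, then 'answer_number + find_melon_number(number_n)': at loop exit
    -- number_n < 3, so the recursive call is its guard branch number_n * 3, inlined here.
    let r := melonLoop number_n 1 0 0 (by norm_num)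
    r.1 + r.2 * 3

-- ===== PORT B =====
-- B's while loop, state (m, k, total); k starts at 1 and only grows, kept as a Nat.
def digitLoop (m : Int) (k : Nat) (acc : Int) : Int :=
  if _h : 0 < m then
    digitLoop (PySem.Int.floordiv m 3) (k + 1)
      (acc + (PySem.Int.mod m 3) * (3 ^ (k + 1) + (k : Int) * 3 ^ (k - 1)))
  else acc
termination_by m.toNat
decreasing_by
  have := PySem.Int.floordiv_eq_ediv_of_pos (a := m) (b := 3) (by omega)
  omega

def find_melon_number_alt (number_n : Int) : Int :=
  if number_n < 3 then number_n * 3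
  else digitLoop (PySem.Int.floordiv number_n 3) 1 0 + 3 * (PySem.Int.mod number_n 3)

-- ===== PRECONDITION & SPEC =====
def Spec_find_melon_number (number_n : Int) (out : Int) : Prop := out = find_melon_number_alt number_n
instance (number_n : Int) (out : Int) : Decidable (Spec_find_melon_number number_n out) := by unfold Spec_find_melon_number; infer_instance

-- ===== CLAIM (what is proved, stated in full; the proofs are below) =====
def Claim_equal_find_melon_number : Prop := ∀ (number_n : Int), Dom_find_melon_number number_n → Spec_find_melon_number number_n (find_melon_number number_n)

-- ===== LEMMAS AND PROOFS =====

-- digitLoop on a number whose top base-3 digit sits at position j: subtracting 3^j removes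
-- exactly the contribution the loop counts for that digit, at loop counter k + j.
theorem digitLoop_sub (j : Nat) : ∀ (m : Int) (k : Nat) (acc : Int),
    3 ^ j ≤ m → m < 3 ^ (j + 1) →
    digitLoop m k acc
      = digitLoop (m - 3 ^ j) k acc + (3 ^ (k + j + 1) + ((k + j : Nat) : Int) * 3 ^ (k + j - 1)) := by
  induction j with
  | zero =>
    intro m k acc h1 h2
    norm_num at h1 h2 ⊢
    have f1 : PySem.Int.floordiv 1 3 = 0 := by decide
    have f2 : PySem.Int.floordiv 2 3 = 0 := by decide
    have g1 : PySem.Int.mod 1 3 = 1 := by decide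
    have g2 : PySem.Int.mod 2 3 = 2 := by decide
    have z : ∀ k acc, digitLoop 0 k acc = acc := by intro k acc; rw [digitLoop]; norm_num
    interval_cases m
    · rw [digitLoop, dif_pos (by norm_num), f1, g1, z, show (1:Int)-1 = 0 from by norm_num, z]
      ring
    · rw [digitLoop, dif_pos (by norm_num), f2, g2, z, show (2:Int)-1 = 1 from by norm_num]
      rw [digitLoop, dif_pos (by norm_num), f1, g1, z]
      ring
  | succ j ih =>
    intro m k acc h1 h2
    have hpow : (3:Int) ^ (j+1) = 3 * 3 ^ j := by ring
    have hpow2 : (3:Int) ^ (j+2) = 9 * 3 ^ j := by ring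
    have ht : (1:Int) ≤ 3 ^ j := one_le_pow₀ (by norm_num)
    have hm : 0 < m := by omega
    rw [digitLoop]; rw [dif_pos hm]
    rw [PySem.Int.floordiv_eq_ediv_of_pos (by norm_num), PySem.Int.mod_eq_emod_of_pos (by norm_num)]
    have hdiv1 : 3 ^ j ≤ m / 3 := by omega
    have hdiv2 : m / 3 < 3 ^ (j + 1) := by omega
    rw [ih (m / 3) (k+1) _ hdiv1 hdiv2]
    by_cases hz : 0 < m - 3 ^ (j+1)
    · conv_rhs => rw [digitLoop]
      rw [dif_pos hz]
      rw [PySem.Int.floordiv_eq_ediv_of_pos (by norm_num), PySem.Int.mod_eq_emod_of_pos (by norm_num)]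
      have e1 : (m - 3 ^ (j+1)) / 3 = m / 3 - 3 ^ j := by omega
      have e2 : (m - 3 ^ (j+1)) % 3 = m % 3 := by omega
      rw [e1, e2]
      have e3 : k + 1 + j + 1 = k + (j + 1) + 1 := by omega
      have e4 : k + 1 + j - 1 = k + (j + 1) - 1 := by omega
      have e5 : ((k + 1 + j : Nat) : Int) = ((k + (j + 1) : Nat) : Int) := by push_cast; ring
      rw [e3, e4, e5]
    · have hm3 : m = 3 ^ (j+1) := by omega
      conv_rhs => rw [digitLoop]
      rw [dif_neg hz]
      have e0 : m / 3 = 3 ^ j := by omega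
      have em : m % 3 = 0 := by omega
      have z0 : ∀ k acc, digitLoop 0 k acc = acc := by intro k acc; rw [digitLoop]; norm_num
      rw [e0, em, sub_self, z0]
      norm_num
      have e6 : k + 1 + j + 1 = k + (j + 1) + 1 := by omega
      rw [e6]; ring

-- B's else-branch formula is valid for every nonnegative input (for inputs < 3 the guard
-- branch and the formula agree, since the digit loop on 0 contributes nothing).
theorem alt_formula (m : Int) (hm : 0 ≤ m) :
    find_melon_number_alt m = digitLoop (PySem.Int.floordiv m 3) 1 0 + 3 * (PySem.Int.mod m 3) := by
  have z0 : ∀ k acc, digitLoop 0 k acc = acc := by intro k acc; rw [digitLoop]; norm_num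
  unfold find_melon_number_alt
  split
  · have h3 : m < 3 := by omega
    interval_cases m
    · rw [show PySem.Int.floordiv 0 3 = 0 from by decide, z0,
         show PySem.Int.mod 0 3 = 0 from by decide]; ring
    · rw [show PySem.Int.floordiv 1 3 = 0 from by decide, z0,
         show PySem.Int.mod 1 3 = 1 from by decide]; ring
    · rw [show PySem.Int.floordiv 2 3 = 0 from by decide, z0,
         show PySem.Int.mod 2 3 = 2 from by decide]; ring
  · rfl

-- B satisfies the greedy recurrence: subtracting the largest power 3^L ≤ n (L ≥ 1)
-- costs exactly 3^(L+1) + L·3^(L-1).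
theorem alt_rec (n : Int) (L : Nat) (hL : 1 ≤ L)
    (h1 : (3:Int) ^ L ≤ n) (h2 : n < 3 ^ (L + 1)) :
    find_melon_number_alt n
      = (3 ^ (L + 1) + (L : Int) * 3 ^ (L - 1)) + find_melon_number_alt (n - 3 ^ L) := by
  have hpow : (3:Int) ^ L = 3 * 3 ^ (L - 1) := by
    conv_lhs => rw [show L = (L - 1) + 1 from by omega]
    ring
  have hpow1 : (3:Int) ^ (L + 1) = 9 * 3 ^ (L - 1) := by
    conv_lhs => rw [show L + 1 = (L - 1) + 2 from by omega]
    ring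
  have ht : (1:Int) ≤ 3 ^ (L - 1) := one_le_pow₀ (by norm_num)
  have hn0 : 0 ≤ n := by omega
  have hs0 : 0 ≤ n - 3 ^ L := by omega
  rw [alt_formula n hn0, alt_formula _ hs0]
  rw [PySem.Int.floordiv_eq_ediv_of_pos (by norm_num), PySem.Int.mod_eq_emod_of_pos (by norm_num),
      PySem.Int.floordiv_eq_ediv_of_pos (by norm_num), PySem.Int.mod_eq_emod_of_pos (by norm_num)]
  have hd1 : (3:Int) ^ (L - 1) ≤ n / 3 := by omega
  have hd2 : n / 3 < 3 ^ ((L - 1) + 1) := by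
    rw [show (L-1) + 1 = L from by omega]; omega
  rw [digitLoop_sub (L - 1) (n / 3) 1 0 hd1 hd2]
  have e1 : (n - 3 ^ L) / 3 = n / 3 - 3 ^ (L - 1) := by omega
  have e2 : (n - 3 ^ L) % 3 = n % 3 := by omega
  have e3 : 1 + (L - 1) + 1 = L + 1 := by omega
  have e4 : 1 + (L - 1) - 1 = L - 1 := by omega
  have e5 : ((1 + (L - 1) : Nat) : Int) = (L : Int) := by
    have : 1 + (L - 1) = L := by omega
    rw [this]
  rw [e1, e2, e3, e4, e5]
  ring

-- A's loop ramps devider up to the largest power 3^L ≤ n, then subtracts it and resets.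
theorem melonLoop_ramp (j : Nat) : ∀ (x : Nat) (n ans : Int) (L : Nat), x + j = L → 1 ≤ L →
    (3:Int) ^ L ≤ n → n < 3 ^ (L + 1) →
    melonLoop n (3 ^ x) x ans (by positivity)
      = melonLoop (n - 3 ^ L) 1 0 (ans + 3 ^ (L + 1) + (L : Int) * 3 ^ (L - 1)) (by norm_num) := by
  induction j with
  | zero =>
    intro x n ans L hx hL h1 h2
    have hx' : x = L := by omega
    subst hx'
    have h3 : (3:Int) ≤ 3 ^ x := by
      calc (3:Int) = 3 ^ 1 := by ring
      _ ≤ 3 ^ x := pow_le_pow_right₀ (by norm_num) (by omega)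
    rw [melonLoop, dif_pos (by omega), dif_pos (by rw [← pow_succ]; omega)]
  | succ j ih =>
    intro x n ans L hx hL h1 h2
    have h3 : (3:Int) ^ (x + 1) ≤ 3 ^ L := pow_le_pow_right₀ (by norm_num) (by omega)
    have h33 : (3:Int) ≤ 3 ^ L := by
      calc (3:Int) = 3 ^ 1 := by ring
      _ ≤ 3 ^ L := pow_le_pow_right₀ (by norm_num) (by omega)
    rw [melonLoop, dif_pos (by omega), dif_neg (by rw [← pow_succ]; omega)]
    have hcongr : ∀ (d1 d2 : Int) (h1 : 0 < d1) (h2 : 0 < d2), d1 = d2 →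
        melonLoop n d1 (x + 1) ans h1 = melonLoop n d2 (x + 1) ans h2 := by
      intro d1 d2 hh1 hh2 h
      subst h
      rfl
    exact (hcongr _ _ _ _ (pow_succ 3 x).symm).trans (ih (x + 1) n ans L (by omega) hL h1 h2)

-- main induction: A's loop followed by 'ans + 3·(final n)' computes ans + B(n), for 0 ≤ n.
theorem melonLoop_eq_alt (N : Nat) : ∀ (n : Int), n.toNat = N → 0 ≤ n → ∀ (ans : Int),
    (melonLoop n 1 0 ans (by norm_num)).1 + (melonLoop n 1 0 ans (by norm_num)).2 * 3
      = ans + find_melon_number_alt n := by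
  induction N using Nat.strong_induction_on with
  | _ N ih =>
    intro n hn hnn ans
    by_cases h3 : n < 3
    · rw [melonLoop, dif_neg (by omega)]
      unfold find_melon_number_alt
      rw [if_pos h3]
    · set L := Nat.log 3 n.toNat with hLdef
      have hp : 3 ^ L ≤ n.toNat := Nat.pow_log_le_self 3 (by omega)
      have hq : n.toNat < 3 ^ (L + 1) := Nat.lt_pow_succ_log_self (by norm_num) n.toNat
      have hL1 : 1 ≤ L := by
        rw [hLdef]
        exact (Nat.le_log_iff_pow_le (by norm_num) (by omega)).mpr (by omega)
      have hcast : (n.toNat : Int) = n := Int.toNat_of_nonneg hnn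
      have h1' : (3:Int) ^ L ≤ n := by
        have := (Nat.cast_le (α := Int)).mpr hp
        push_cast at this; rwa [hcast] at this
      have h2' : n < (3:Int) ^ (L + 1) := by
        have := (Nat.cast_lt (α := Int)).mpr hq
        push_cast at this; rwa [hcast] at this
      have h3L : (3:Int) ≤ 3 ^ L := by
        calc (3:Int) = 3 ^ 1 := by ring
        _ ≤ 3 ^ L := pow_le_pow_right₀ (by norm_num) (by omega)
      have hcongr : ∀ (d1 d2 : Int) (hh1 : 0 < d1) (hh2 : 0 < d2), d1 = d2 →
          melonLoop n d1 0 ans hh1 = melonLoop n d2 0 ans hh2 := by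
        intro d1 d2 hh1 hh2 h
        subst h
        rfl
      have hramp := (hcongr _ _ (by norm_num) _ (pow_zero 3).symm).trans
        (melonLoop_ramp L 0 n ans L (by omega) hL1 h1' h2')
      rw [hramp]
      have hlt : (n - 3 ^ L).toNat < N := by omega
      rw [ih _ hlt (n - 3 ^ L) rfl (by omega)]
      rw [alt_rec n L hL1 h1' h2']
      ring

-- ===== VERDICT (by name: the statement is the Claim_ definition above) =====
theorem find_melon_number_spec : Claim_equal_find_melon_number := by
  intro n _
  unfold Spec_find_melon_number find_melon_number
  split
  · unfold find_melon_number_alt; rw [if_pos ‹_›]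
  · have := melonLoop_eq_alt n.toNat n rfl (by omega) 0
    simpa using this
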